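-- pv_equiv track=rewrite | github.com/Keccoe10/Python | program01.py | Presync
-- ===== SOURCE A (Python) =====
-- def Presync(a,b,ma,mb,cba,cab,tau):
--     for j in range(len(b)):
--         if b[j]==1:
--             mb+=1
--             if j<tau+1:
--                 x=a[0:j+1]
--                 for k in range(len(x)):
--                     if x[k]==1:
--                         cba+=1
--             else:
--                 x=a[tau+1:j]
--                 for k in range(len(x)):
--                     if x[k]==1:
--                         cba+=1
--     for j in range(len(a)):
--         if a[j]==1:
--             ma+=1
--             if j<tau+1:
--                 x=b[0:j+1]
--                 for k in range(len(x)):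
--                     if x[k]==1:
--                         cab+=1
--             else:
--                 x=b[tau+1:j]
--                 for k in range(len(x)):
--                     if x[k]==1:
--                         cab+=1
--     return cba,cab,mb,ma
-- ===== SOURCE B (Python) =====
-- def Presync(a, b, ma, mb, cba, cab, tau):
--     # Prefix sums of ones: each window count is a difference of two prefix values instead of an inner scan.
--     def prefix(xs):
--         p = [0]
--         t = 0
--         for v in xs:
--             if v == 1:
--                 t += 1
--             p.append(t)
--         return p
--
--     def clamp(x, n):
--         if x < 0:
--             x += n
--         if x < 0:
--             return 0
--         if x > n:
--             return n
--         return x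
--
--     def scan(src, p, m, c):
--         n = len(p) - 1
--         for j in range(len(src)):
--             if src[j] == 1:
--                 m += 1
--                 if j < tau + 1:
--                     c += p[clamp(j + 1, n)]
--                 else:
--                     lo = clamp(tau + 1, n)
--                     hi = clamp(j, n)
--                     if hi > lo:
--                         c += p[hi] - p[lo]
--         return m, c
--
--     pa = prefix(a)
--     pb = prefix(b)
--     mb, cba = scan(b, pa, mb, cba)
--     ma, cab = scan(a, pb, ma, cab)
--     return cba, cab, mb, ma
-- ===== Notes on version B (the rewrite author's own statement) =====
-- stated objective: alternative
-- what changed: Replaces A's inner per-window element scans with prefix-sum arrays of ones built once, so each window count becomes a difference of two prefix values instead of a slice traversal.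
import Mathlib
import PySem

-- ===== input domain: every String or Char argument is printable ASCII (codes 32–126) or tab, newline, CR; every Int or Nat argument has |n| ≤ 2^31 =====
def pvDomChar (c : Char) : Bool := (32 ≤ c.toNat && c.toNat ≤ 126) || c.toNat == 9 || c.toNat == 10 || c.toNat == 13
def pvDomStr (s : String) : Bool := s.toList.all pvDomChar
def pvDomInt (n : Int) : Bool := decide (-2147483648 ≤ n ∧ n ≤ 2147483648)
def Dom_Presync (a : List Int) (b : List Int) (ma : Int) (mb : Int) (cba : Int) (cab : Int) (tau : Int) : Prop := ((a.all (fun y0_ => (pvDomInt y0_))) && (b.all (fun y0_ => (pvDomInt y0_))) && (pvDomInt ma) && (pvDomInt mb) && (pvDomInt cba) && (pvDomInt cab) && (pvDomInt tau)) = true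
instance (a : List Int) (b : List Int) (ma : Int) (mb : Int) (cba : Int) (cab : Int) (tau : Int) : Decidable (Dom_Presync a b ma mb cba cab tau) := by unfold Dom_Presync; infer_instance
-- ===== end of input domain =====

-- B replaces A's inner per-window element scans by prefix-sum arrays of ones, each window count being a difference of two prefix values; no argument is mutated.

-- ===== PORT A =====
-- one outer loop of A (used twice, for (b,a) and (a,b)): counts markers in src and, per
-- set bit, scans the slice of win element by element, exactly as the Python does
-- the inner 'for k in range(len(x)): if x[k]==1: c+=1' scan of A
def innerA (x : List Int) (c : Int) : Int :=
  (PySem.List.pyRange 0 (PySem.List.len x) 1).foldl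
    (fun cc k => if PySem.List.pyGetD x k 0 = 1 then cc + 1 else cc) c

def scanA (src win : List Int) (tau m c : Int) : Int × Int :=
  (PySem.List.pyRange 0 (PySem.List.len src) 1).foldl (fun (s : Int × Int) j =>
    if PySem.List.pyGetD src j 0 = 1 then
      let x := if j < tau + 1 then PySem.List.slice win (some 0) (some (j+1))
               else PySem.List.slice win (some (tau+1)) (some j)
      (s.1 + 1, innerA x s.2)
    else s) (m, c)

def Presync (a : List Int) (b : List Int) (ma : Int) (mb : Int) (cba : Int) (cab : Int) (tau : Int) : List Int :=
  let r1 := scanA b a tau mb cba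
  let r2 := scanA a b tau ma cab
  [r1.2, r2.2, r1.1, r2.1]

-- ===== PORT B =====
-- prefix(xs) of Source B: p[k] = number of ones among the first k elements
def prefixOnes (xs : List Int) : List Int :=
  (xs.foldl (fun (s : List Int × Int) v =>
      let t := if v = 1 then s.2 + 1 else s.2
      (s.1 ++ [t], t)) ([0], 0)).1

-- clamp(x, n) of Source B: Python slice-bound clamping
def clampB (x n : Int) : Int :=
  let x' := if x < 0 then x + n else x
  if x' < 0 then 0 else if x' > n then n else x'

-- scan(src, p, m, c) of Source B: each window count is one prefix difference
def scanB (src p : List Int) (tau m c : Int) : Int × Int :=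
  let n : Int := PySem.List.len p - 1
  (PySem.List.pyRange 0 (PySem.List.len src) 1).foldl (fun (s : Int × Int) j =>
    if PySem.List.pyGetD src j 0 = 1 then
      if j < tau + 1 then
        (s.1 + 1, s.2 + PySem.List.pyGetD p (clampB (j + 1) n) 0)
      else
        let lo := clampB (tau + 1) n
        let hi := clampB j n
        if hi > lo then (s.1 + 1, s.2 + (PySem.List.pyGetD p hi 0 - PySem.List.pyGetD p lo 0))
        else (s.1 + 1, s.2)
    else s) (m, c)

def Presync_alt (a : List Int) (b : List Int) (ma : Int) (mb : Int) (cba : Int) (cab : Int) (tau : Int) : List Int :=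
  let pa := prefixOnes a
  let pb := prefixOnes b
  let r1 := scanB b pa tau mb cba
  let r2 := scanB a pb tau ma cab
  [r1.2, r2.2, r1.1, r2.1]

-- ===== PRECONDITION & SPEC =====
def Spec_Presync (a : List Int) (b : List Int) (ma : Int) (mb : Int) (cba : Int) (cab : Int) (tau : Int) (out : List Int) : Prop := out = Presync_alt a b ma mb cba cab tau
instance (a : List Int) (b : List Int) (ma : Int) (mb : Int) (cba : Int) (cab : Int) (tau : Int) (out : List Int) : Decidable (Spec_Presync a b ma mb cba cab tau out) := by unfold Spec_Presync; infer_instance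

-- ===== CLAIM (what is proved, stated in full; the proofs are below) =====
def Claim_equal_Presync : Prop := ∀ (a : List Int) (b : List Int) (ma : Int) (mb : Int) (cba : Int) (cab : Int) (tau : Int), Dom_Presync a b ma mb cba cab tau → Spec_Presync a b ma mb cba cab tau (Presync a b ma mb cba cab tau)

-- ===== LEMMAS AND PROOFS =====
def cntOnes (xs : List Int) : Int := (xs.countP (fun v => v == 1) : Int)

theorem cntOnes_append (xs ys : List Int) : cntOnes (xs ++ ys) = cntOnes xs + cntOnes ys := by
  simp [cntOnes, List.countP_append]

theorem foldl_count_eq (xs : List Int) (c : Int) :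
    xs.foldl (fun cc v => if v = 1 then cc + 1 else cc) c = c + cntOnes xs := by
  induction xs generalizing c with
  | nil => simp [cntOnes]
  | cons h t ih =>
    simp only [List.foldl_cons, ih]
    by_cases h1 : h = 1
    · simp [cntOnes, h1]; ring
    · simp [cntOnes, h1]

theorem cntOnes_snoc (ys : List Int) (v : Int) :
    cntOnes (ys ++ [v]) = if v = 1 then cntOnes ys + 1 else cntOnes ys := by
  by_cases h : v = 1 <;> simp [cntOnes, List.countP_append, h]

theorem inner_count (x : List Int) (c : Int) : innerA x c = c + cntOnes x := by
  unfold innerA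
  rw [PySem.List.foldl_pyRange_zero_pyGetD x 0 (fun cc v => if v = 1 then cc + 1 else cc) c]
  exact foldl_count_eq x c

theorem prefixOnes_fold (xs : List Int) :
    xs.foldl (fun (s : List Int × Int) v =>
      let t := if v = 1 then s.2 + 1 else s.2
      (s.1 ++ [t], t)) ([0], 0)
    = ((List.range (xs.length + 1)).map (fun k => cntOnes (xs.take k)), cntOnes xs) := by
  induction xs using List.reverseRecOn with
  | nil => simp [cntOnes]
  | append_singleton ys v ih =>
    rw [List.foldl_append, ih]
    simp only [List.foldl_cons, List.foldl_nil]
    rw [← cntOnes_snoc]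
    have hmap : (List.range ((ys ++ [v]).length + 1)).map (fun k => cntOnes ((ys ++ [v]).take k))
        = (List.range (ys.length + 1)).map (fun k => cntOnes (ys.take k)) ++ [cntOnes (ys ++ [v])] := by
      rw [List.length_append, List.length_singleton, List.range_succ, List.map_append]
      congr 1
      · apply List.map_congr_left
        intro k hk
        rw [List.take_append_of_le_length (Nat.lt_succ_iff.mp (List.mem_range.mp hk))]
      · have h2 : (ys ++ [v]).take (ys.length + 1) = ys ++ [v] := by
          apply List.take_of_length_le; simp
        simp [h2]
    rw [hmap]

theorem prefixOnes_eq (xs : List Int) :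
    prefixOnes xs = (List.range (xs.length + 1)).map (fun k => cntOnes (xs.take k)) := by
  simp [prefixOnes, prefixOnes_fold]

theorem prefixOnes_length (xs : List Int) : (prefixOnes xs).length = xs.length + 1 := by
  simp [prefixOnes_eq]

theorem prefixOnes_getD (xs : List Int) (k : Nat) (hk : k ≤ xs.length) :
    (prefixOnes xs).getD k 0 = cntOnes (xs.take k) := by
  rw [prefixOnes_eq, List.getD_eq_getElem?_getD, List.getElem?_map, List.getElem?_range (by omega)]
  rfl

theorem clampB_eq (x : Int) (len : Nat) :
    clampB x (len : Int) = ((PySem.List.clampIdx len x : Nat) : Int) := by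
  simp only [clampB, PySem.List.clampIdx]
  split_ifs <;> omega

theorem clampIdx_of_nonneg' (x : Int) (len : Nat) (hx : 0 ≤ x) :
    ((PySem.List.clampIdx len x : Nat) : Int) = min x (len : Int) := by
  have h := clampB_eq x len
  simp only [clampB] at h
  split_ifs at h <;> omega

theorem slice_char (xs : List Int) (a b : Int) :
    PySem.List.slice xs (some a) (some b)
    = (xs.drop (PySem.List.clampIdx xs.length a)).take
        (PySem.List.clampIdx xs.length b - PySem.List.clampIdx xs.length a) := rfl

theorem cnt_take_split (xs : List Int) (lo hi : Nat) (h : lo ≤ hi) :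
    cntOnes (xs.take hi) = cntOnes (xs.take lo) + cntOnes ((xs.drop lo).take (hi - lo)) := by
  conv_lhs => rw [show hi = lo + (hi - lo) by omega, List.take_add]
  rw [cntOnes_append]

theorem scan_eq (src win : List Int) (tau m c : Int) :
    scanA src win tau m c = scanB src (prefixOnes win) tau m c := by
  unfold scanA scanB
  have hlen : PySem.List.len (prefixOnes win) - 1 = ((win.length : Int)) := by
    simp [prefixOnes_length]
  rw [hlen]
  apply PySem.List.foldl_congr_mem'
  intro j hj s
  obtain ⟨hj0, hjlt⟩ := PySem.List.mem_pyRange_one.mp hj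
  by_cases hsrc : PySem.List.pyGetD src j 0 = 1
  · rw [if_pos hsrc, if_pos hsrc]
    by_cases hb : j < tau + 1
    · rw [if_pos hb, if_pos hb]
      have h00 := clampIdx_of_nonneg' 0 win.length le_rfl
      have hx : PySem.List.slice win (some 0) (some (j + 1))
          = win.take (PySem.List.clampIdx win.length (j + 1)) := by
        rw [slice_char]
        have h0 : PySem.List.clampIdx win.length 0 = 0 := by omega
        rw [h0, List.drop_zero, Nat.sub_zero]
      simp only [hx, inner_count]
      rw [clampB_eq (j + 1) win.length, PySem.List.pyGetD_natCast,
        prefixOnes_getD win _ (PySem.List.clampIdx_le _ _)]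
    · rw [if_neg hb, if_neg hb]
      simp only [slice_char]
      rw [inner_count]
      simp only [clampB_eq, PySem.List.pyGetD_natCast]
      rw [prefixOnes_getD win _ (PySem.List.clampIdx_le _ _),
        prefixOnes_getD win _ (PySem.List.clampIdx_le _ _)]
      by_cases hHL : PySem.List.clampIdx win.length (tau + 1) < PySem.List.clampIdx win.length j
      · rw [if_pos (by exact_mod_cast hHL)]
        refine Prod.ext rfl ?_
        have hsplit := cnt_take_split win _ _ (Nat.le_of_lt hHL)
        rw [hsplit]
        ring
      · rw [if_neg (by exact_mod_cast hHL)]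
        have h0 : PySem.List.clampIdx win.length j - PySem.List.clampIdx win.length (tau + 1) = 0 := by
          omega
        simp only [h0, List.take_zero]
        simp [cntOnes]
  · rw [if_neg hsrc, if_neg hsrc]

theorem Presync_eq (a b : List Int) (ma mb cba cab tau : Int) :
    Presync a b ma mb cba cab tau = Presync_alt a b ma mb cba cab tau := by
  simp only [Presync, Presync_alt, scan_eq]

-- ===== VERDICT (by name: the statement is the Claim_ definition above) =====
theorem Presync_spec : Claim_equal_Presync := by
  intro a b ma mb cba cab tau _
  exact Presync_eq a b ma mb cba cab tau
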